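-- pv_equiv track=rewrite | github.com/dfadeeff/LeetCode_Python | pythonProject/Curated_lists/Uber/LC2571_MinOpsReduceInt.py | minOperations
-- ===== SOURCE A (Python) =====
-- def minOperations(n: int) -> int:
--     """
--     n & 1       check last bit
--     n & 3       check last TWO bits (3 = 11 in binary)
--     n >>= 1     shift right = divide by 2 (drop last 0)
--     n += 1      carry propagates through consecutive 1s
--     n -= 1      eliminate single 1
--
--     """
--     ops = 0
--     while n:
--         if n & 1 == 0:  # last bit 0 → shift right (free)
--             n >>= 1
--         elif n & 3 == 3:  # last two bits 11 → merge with +1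
--             n += 1
--             ops += 1
--         else:  # last bit 1, next 0 → subtract
--             n -= 1
--             ops += 1
--     return ops
-- ===== SOURCE B (Python) =====
-- def minOperations(n: int) -> int:
--     # Minimum power-of-2 add/subtract ops = Hamming weight of the NAF of n,
--     # which is the popcount of (3*n) XOR n.  No loop, no carry bookkeeping.
--     return ((3 * n) ^ n).bit_count()
-- ===== Notes on version B (the rewrite author's own statement) =====
-- stated objective: simpler
-- what changed: Replaces the bit-scanning greedy loop with the closed form popcount((3n) XOR n), the Hamming weight of n's non-adjacent form.
import Mathlib
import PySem

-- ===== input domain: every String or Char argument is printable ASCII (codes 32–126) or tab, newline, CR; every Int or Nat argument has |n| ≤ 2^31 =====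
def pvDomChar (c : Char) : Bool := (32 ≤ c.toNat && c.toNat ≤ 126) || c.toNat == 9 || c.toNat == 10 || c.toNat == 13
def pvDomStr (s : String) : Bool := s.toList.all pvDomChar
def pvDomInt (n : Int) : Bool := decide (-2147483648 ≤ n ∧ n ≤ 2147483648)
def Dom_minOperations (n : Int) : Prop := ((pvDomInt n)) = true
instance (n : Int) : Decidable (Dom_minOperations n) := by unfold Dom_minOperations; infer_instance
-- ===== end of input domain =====

-- B replaces A's greedy bit-scanning loop with the closed form popcount((3n) XOR n)
-- (the Hamming weight of n's non-adjacent form); objective: simpler.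

-- ===== PORT A =====
-- while-loop of A as fuel recursion; the fuel only makes the loop total
-- (sufficiency is proved below), each step is A's code verbatim.
def minOpGo : Nat → Int → Int → Int
  | 0, _, ops => ops
  | fuel+1, n, ops =>
    if n = 0 then ops
    else if PySem.Int.band n 1 = 0 then minOpGo fuel (n >>> (1:Nat)) ops
    else if PySem.Int.band n 3 = 3 then minOpGo fuel (n + 1) (ops + 1)
    else minOpGo fuel (n - 1) (ops + 1)

def minOperations (n : Int) : Int :=
  minOpGo (3 * PySem.Int.bitLength n + 5) n 0

-- ===== PORT B =====
def minOperations_alt (n : Int) : Int :=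
  (PySem.Int.bitCount (PySem.Int.bxor (3 * n) n) : Int)

-- ===== PRECONDITION & SPEC =====
def Spec_minOperations (n : Int) (out : Int) : Prop := out = minOperations_alt n
instance (n : Int) (out : Int) : Decidable (Spec_minOperations n out) := by unfold Spec_minOperations; infer_instance

-- ===== CLAIM (what is proved, stated in full; the proofs are below) =====
def Claim_equal_minOperations : Prop := ∀ (n : Int), Dom_minOperations n → Spec_minOperations n (minOperations n)

-- ===== LEMMAS AND PROOFS =====

-- B's value as a Nat-valued function (proof-side abbreviation).
def pvT (n : Int) : Nat := PySem.Int.bitCount (PySem.Int.bxor (3 * n) n)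

-- bit-level xor lemmas on Nat
lemma pv_bit_xor_bit (p q : Bool) (a b : Nat) :
    (Nat.bit p a) ^^^ (Nat.bit q b) = Nat.bit (p ^^ q) (a ^^^ b) := by
  apply Nat.eq_of_testBit_eq; intro i
  cases i with
  | zero => simp
  | succ j => simp [Nat.testBit_bit_succ]

lemma pvX1 (a b : Nat) : (2*a) ^^^ (2*b) = 2*(a ^^^ b) := by
  simpa [Nat.bit] using pv_bit_xor_bit false false a b
lemma pvX2 (a b : Nat) : (2*a+1) ^^^ (2*b+1) = 2*(a ^^^ b) := by
  simpa [Nat.bit] using pv_bit_xor_bit true true a b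
lemma pvX3 (a b : Nat) : (2*a+1) ^^^ (2*b) = 2*(a ^^^ b)+1 := by
  simpa [Nat.bit] using pv_bit_xor_bit true false a b
lemma pvX4 (a b : Nat) : (2*a) ^^^ (2*b+1) = 2*(a ^^^ b)+1 := by
  simpa [Nat.bit] using pv_bit_xor_bit false true a b

-- bitCount of casts
lemma pvCeven (a : Nat) : PySem.Int.bitCount ((2*a : Nat) : Int) = PySem.Int.bitCount (a : Int) := by
  rcases Nat.eq_zero_or_pos a with h | h
  · simp [h]
  · rw [PySem.Int.bitCount_natCast (by omega)]
    have h2 : 2*a % 2 = 0 := by omega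
    have h3 : 2*a / 2 = a := by omega
    rw [h2, h3]
    omega

lemma pvCodd (a : Nat) : PySem.Int.bitCount ((2*a+1 : Nat) : Int) = 1 + PySem.Int.bitCount (a : Int) := by
  rw [PySem.Int.bitCount_natCast (by omega)]
  have h2 : (2*a+1) % 2 = 1 := by omega
  have h3 : (2*a+1) / 2 = a := by omega
  rw [h2, h3]

-- bitLength brackets
lemma pvBlLe (x : Int) (k : Nat) (h : x.natAbs < 2^k) : PySem.Int.bitLength x ≤ k := by
  by_contra hc
  have hc' : k < PySem.Int.bitLength x := by omega
  have hx : x ≠ 0 := by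
    intro h0; rw [h0] at hc'; simp at hc'
  have h1 := PySem.Int.two_pow_bitLength_le x hx
  have h2 : (2:Nat)^k ≤ 2^(PySem.Int.bitLength x - 1) := Nat.pow_le_pow_right (by omega) (by omega)
  omega

lemma pvBlGt (x : Int) (k : Nat) (h : 2^k ≤ x.natAbs) : k < PySem.Int.bitLength x := by
  by_contra hc
  have hc' : PySem.Int.bitLength x ≤ k := by omega
  have h1 := PySem.Int.lt_two_pow_bitLength x
  have h2 : (2:Nat)^(PySem.Int.bitLength x) ≤ 2^k := Nat.pow_le_pow_right (by omega) hc'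
  omega

lemma pvBlDouble (m : Int) (hm : m ≠ 0) :
    PySem.Int.bitLength (2*m) = PySem.Int.bitLength m + 1 := by
  have h1 := PySem.Int.lt_two_pow_bitLength m
  have h2 := PySem.Int.two_pow_bitLength_le m hm
  have habs : (2*m).natAbs = 2 * m.natAbs := by
    simp [Int.natAbs_mul]
  have hbl1 : 1 ≤ PySem.Int.bitLength m := by
    apply pvBlGt
    simpa using (by omega : 2^0 ≤ m.natAbs)
  have hle : PySem.Int.bitLength (2*m) ≤ PySem.Int.bitLength m + 1 := by
    apply pvBlLe; rw [habs, pow_succ]; omega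
  have hgt : PySem.Int.bitLength m < PySem.Int.bitLength (2*m) := by
    apply pvBlGt; rw [habs]
    have he : (2:Nat)^(PySem.Int.bitLength m) = 2^(PySem.Int.bitLength m - 1) * 2 := by
      rw [← pow_succ]; congr 1; omega
    omega
  omega

lemma pvBlAdj (n d : Int) (hd : d.natAbs ≤ 1) :
    PySem.Int.bitLength (n + d) ≤ PySem.Int.bitLength n + 1 := by
  have h1 := PySem.Int.lt_two_pow_bitLength n
  apply pvBlLe
  have habs : (n + d).natAbs ≤ n.natAbs + 1 := by omega
  rw [pow_succ]; omega

-- band facts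
lemma pvBand1 (n : Int) : PySem.Int.band n 1 = n % 2 := by
  rw [PySem.Int.band_one, PySem.Int.mod_eq_emod_of_pos (by omega)]

lemma pvBand3 (n : Int) : PySem.Int.band n 3 = n % 4 := by
  by_cases h : 0 ≤ n
  · simp only [PySem.Int.band, if_pos h, if_pos (by omega : (0:Int) ≤ 3)]
    have e : (3:Int).toNat = 2^2 - 1 := by decide
    rw [e, Nat.and_two_pow_sub_one_eq_mod]
    omega
  · simp only [PySem.Int.band, if_neg h, if_pos (by omega : (0:Int) ≤ 3)]
    have e : (3:Int).toNat = 2^2 - 1 := by decide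
    rw [e, Nat.and_comm, Nat.and_two_pow_sub_one_eq_mod]
    omega

-- pvT over casts
lemma pvTpos (a : Nat) : pvT (a : Int) = PySem.Int.bitCount ((3*a ^^^ a : Nat) : Int) := by
  unfold pvT
  have h : (3 : Int) * (a : Int) = ((3*a : Nat) : Int) := by push_cast; ring
  rw [h, PySem.Int.bxor_natCast]

lemma pvTneg (a : Nat) (ha : 0 < a) :
    pvT (-(a : Int)) = PySem.Int.bitCount (((3*a - 1) ^^^ (a - 1) : Nat) : Int) := by
  unfold pvT
  simp only [PySem.Int.bxor]
  rw [if_neg (by omega), if_neg (by omega)]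
  have h1 : (-(3 * -(a:Int)) - 1).toNat = 3*a - 1 := by omega
  have h2 : (- -(a:Int) - 1).toNat = a - 1 := by omega
  rw [h1, h2]

-- the NAF shift identity
lemma pvK : ∀ a : Nat, (3*a+2) ^^^ a = (3*(a+1)) ^^^ (a+1) := by
  intro a
  induction a using Nat.strong_induction_on with
  | _ a ih =>
    rcases Nat.even_or_odd a with ⟨b, rfl⟩ | ⟨b, rfl⟩
    · rw [show b + b = 2*b from by ring]
      have eL : 3*(2*b)+2 = 2*(3*b+1) := by ring
      rw [eL, pvX1]
      have eR1 : 3*(2*b+1) = 2*(3*b+1)+1 := by ring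
      rw [eR1, pvX2]
    · have eL : 3*(2*b+1)+2 = 2*(3*b+2)+1 := by ring
      rw [eL, pvX2]
      have eR1 : 3*(2*b+1+1) = 2*(3*(b+1)) := by ring
      have eR2 : (2*b+1+1) = 2*(b+1) := by ring
      rw [eR1, eR2, pvX1, ← ih b (by omega)]

-- pvT recurrences
lemma pvLeven (m : Int) (hm : m ≠ 0) : pvT (2*m) = pvT m := by
  rcases lt_trichotomy m 0 with h | h | h
  · obtain ⟨a, ha, rfl⟩ : ∃ a : Nat, 0 < a ∧ m = -(a : Int) :=
      ⟨m.natAbs, by omega, by omega⟩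
    have h2 : (2 : Int) * -(a : Int) = -((2*a : Nat) : Int) := by push_cast; ring
    rw [h2, pvTneg _ (by omega), pvTneg _ ha]
    have e1 : 3*(2*a) - 1 = 2*(3*a-1)+1 := by omega
    have e2 : 2*a - 1 = 2*(a-1)+1 := by omega
    rw [e1, e2, pvX2, pvCeven]
  · omega
  · obtain ⟨a, ha, rfl⟩ : ∃ a : Nat, 0 < a ∧ m = (a : Int) :=
      ⟨m.natAbs, by omega, by omega⟩
    have h2 : (2 : Int) * (a : Int) = ((2*a : Nat) : Int) := by push_cast; ring
    rw [h2, pvTpos, pvTpos]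
    have e1 : 3*(2*a) = 2*(3*a) := by ring
    rw [e1, pvX1, pvCeven]

lemma pvL3 (n : Int) (h : n % 4 = 3) : pvT n = pvT (n+1) + 1 := by
  rcases lt_trichotomy n 0 with hn | hn | hn
  · obtain ⟨a, rfl⟩ : ∃ a : Nat, n = -((4*a+1 : Nat) : Int) :=
      ⟨((-n-1)/4).toNat, by omega⟩
    rw [pvTneg _ (by omega)]
    have e1 : 3*(4*a+1) - 1 = 2*(6*a+1) := by omega
    have e2 : 4*a+1 - 1 = 2*(2*a) := by omega
    rw [e1, e2, pvX1]
    have e3 : 6*a+1 = 2*(3*a)+1 := by omega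
    rw [e3, pvX3, pvCeven, pvCodd]
    rcases Nat.eq_zero_or_pos a with ha | ha
    · subst ha
      norm_num
      unfold pvT
      decide
    · have hstep : -((4*a+1 : Nat) : Int) + 1 = -((4*a : Nat) : Int) := by push_cast; ring
      rw [hstep, pvTneg _ (by omega)]
      have e5 : 3*(4*a) - 1 = 2*(6*a-1)+1 := by omega
      have e6 : 4*a - 1 = 2*(2*a-1)+1 := by omega
      rw [e5, e6, pvX2]
      have e7 : 6*a-1 = 2*(3*a-1)+1 := by omega
      have e8 : 2*a-1 = 2*(a-1)+1 := by omega
      rw [e7, e8, pvX2, pvCeven, pvCeven]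
      have hk := pvK (a-1)
      have ea : 3*(a-1)+2 = 3*a-1 := by omega
      have eb : 3*((a-1)+1) = 3*a := by omega
      have ec : (a-1)+1 = a := by omega
      rw [ea, eb, ec] at hk
      rw [← hk]
      omega
  · omega
  · obtain ⟨a, rfl⟩ : ∃ a : Nat, n = ((4*a+3 : Nat) : Int) :=
      ⟨((n-3)/4).toNat, by omega⟩
    have hstep : ((4*a+3 : Nat) : Int) + 1 = ((4*a+4 : Nat) : Int) := by push_cast; ring
    rw [pvTpos, hstep, pvTpos]
    have e1 : 3*(4*a+3) = 2*(6*a+4)+1 := by ring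
    have e2 : (4*a+3 : Nat) = 2*(2*a+1)+1 := by ring
    rw [e1, e2, pvX2]
    have e3 : 6*a+4 = 2*(3*a+2) := by ring
    rw [e3, pvX4, pvCeven, pvCodd]
    have e4 : 3*(4*a+4) = 2*(6*a+6) := by ring
    have e5 : (4*a+4 : Nat) = 2*(2*a+2) := by ring
    rw [e4, e5, pvX1]
    have e6 : 6*a+6 = 2*(3*(a+1)) := by ring
    have e7 : 2*a+2 = 2*(a+1) := by ring
    rw [e6, e7, pvX1, pvCeven, pvCeven, ← pvK a]
    omega

lemma pvL1 (n : Int) (h : n % 4 = 1) : pvT n = pvT (n-1) + 1 := by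
  rcases lt_trichotomy n 0 with hn | hn | hn
  · obtain ⟨a, rfl⟩ : ∃ a : Nat, n = -((4*a+3 : Nat) : Int) :=
      ⟨((-n-3)/4).toNat, by omega⟩
    rw [pvTneg _ (by omega)]
    have e1 : 3*(4*a+3) - 1 = 2*(6*a+4) := by omega
    have e2 : 4*a+3 - 1 = 2*(2*a+1) := by omega
    rw [e1, e2, pvX1]
    have e3 : 6*a+4 = 2*(3*a+2) := by ring
    rw [e3, pvX4, pvCeven, pvCodd]
    have hstep : -((4*a+3 : Nat) : Int) - 1 = -((4*a+4 : Nat) : Int) := by push_cast; ring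
    rw [hstep, pvTneg _ (by omega)]
    have e4 : 3*(4*a+4) - 1 = 2*(6*a+5)+1 := by omega
    have e5 : 4*a+4 - 1 = 2*(2*a+1)+1 := by omega
    rw [e4, e5, pvX2]
    have e6 : 6*a+5 = 2*(3*a+2)+1 := by omega
    rw [e6, pvX2, pvCeven, pvCeven]
    omega
  · omega
  · obtain ⟨a, rfl⟩ : ∃ a : Nat, n = ((4*a+1 : Nat) : Int) :=
      ⟨((n-1)/4).toNat, by omega⟩
    have hstep : ((4*a+1 : Nat) : Int) - 1 = ((4*a : Nat) : Int) := by push_cast; ring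
    rw [pvTpos, hstep, pvTpos]
    have e1 : 3*(4*a+1) = 2*(6*a+1)+1 := by ring
    have e2 : (4*a+1 : Nat) = 2*(2*a)+1 := by ring
    rw [e1, e2, pvX2]
    have e3 : 6*a+1 = 2*(3*a)+1 := by ring
    rw [e3, pvX3, pvCeven, pvCodd]
    have e4 : 3*(4*a) = 2*(6*a) := by ring
    have e5 : (4*a : Nat) = 2*(2*a) := by ring
    rw [e4, e5, pvX1]
    have e6 : (6*a : Nat) = 2*(3*a) := by ring
    rw [e6, pvX1, pvCeven, pvCeven]
    omega

-- size bound on pvT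
lemma pvTle (n : Int) : pvT n ≤ PySem.Int.bitLength n + 2 := by
  have hbc := PySem.Int.bitCount_le_bitLength (PySem.Int.bxor (3*n) n)
  have h1 := PySem.Int.lt_two_pow_bitLength n
  have key : (PySem.Int.bxor (3*n) n).natAbs < 2^(PySem.Int.bitLength n + 2) := by
    rcases lt_trichotomy n 0 with hn | hn | hn
    · obtain ⟨a, ha, rfl⟩ : ∃ a : Nat, 0 < a ∧ n = -(a : Int) :=
        ⟨n.natAbs, by omega, by omega⟩
      have habs : (-(a:Int)).natAbs = a := by omega
      rw [habs] at h1
      have hx : PySem.Int.bxor (3 * -(a:Int)) (-(a:Int)) = (((3*a-1) ^^^ (a-1) : Nat) : Int) := by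
        simp only [PySem.Int.bxor]
        rw [if_neg (by omega), if_neg (by omega)]
        have g1 : (-(3 * -(a:Int)) - 1).toNat = 3*a - 1 := by omega
        have g2 : (- -(a:Int) - 1).toNat = a - 1 := by omega
        rw [g1, g2]
      rw [hx]
      have hb : PySem.Int.bitLength (-(a:Int)) = PySem.Int.bitLength ((a:Int)) := by simp
      rw [hb]
      rw [hb] at h1
      have hbound : (2:Nat)^(PySem.Int.bitLength ((a:Int)) + 2) = 4 * 2^(PySem.Int.bitLength ((a:Int))) := by
        rw [pow_add]; ring
      have hxor := Nat.xor_lt_two_pow (x := 3*a-1) (y := a-1) (n := PySem.Int.bitLength ((a:Int)) + 2)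
        (by omega) (by omega)
      omega
    · subst hn; decide
    · obtain ⟨a, ha, rfl⟩ : ∃ a : Nat, 0 < a ∧ n = (a : Int) :=
        ⟨n.natAbs, by omega, by omega⟩
      have habs : ((a:Int)).natAbs = a := by omega
      rw [habs] at h1
      have hx : PySem.Int.bxor (3 * (a:Int)) ((a:Int)) = ((3*a ^^^ a : Nat) : Int) := by
        have h : (3 : Int) * (a : Int) = ((3*a : Nat) : Int) := by push_cast; ring
        rw [h, PySem.Int.bxor_natCast]
      rw [hx]
      have hbound : (2:Nat)^(PySem.Int.bitLength ((a:Int)) + 2) = 4 * 2^(PySem.Int.bitLength ((a:Int))) := by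
        rw [pow_add]; ring
      have hxor := Nat.xor_lt_two_pow (x := 3*a) (y := a) (n := PySem.Int.bitLength ((a:Int)) + 2)
        (by omega) (by omega)
      omega
  have hfin := pvBlLe _ _ key
  unfold pvT
  omega

-- shift is halving for even numbers
lemma pvShift1 (m : Int) : (2*m) >>> (1:Nat) = m := by
  rw [Int.shiftRight_eq_div_pow]
  omega

-- the loop computes ops + pvT n, given enough fuel
lemma pvGoEq : ∀ fuel (n ops : Int),
    PySem.Int.bitLength n + 2 * pvT n < fuel → minOpGo fuel n ops = ops + (pvT n : Int) := by
  intro fuel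
  induction fuel with
  | zero => intro n ops h; omega
  | succ f ih =>
    intro n ops h
    by_cases h0 : n = 0
    · subst h0
      have hT : pvT 0 = 0 := by decide
      simp [minOpGo, hT]
    · by_cases he : PySem.Int.band n 1 = 0
      · have hmod : n % 2 = 0 := by rw [pvBand1] at he; exact he
        obtain ⟨m, rfl⟩ : ∃ m : Int, n = 2*m := ⟨n/2, by omega⟩
        have hm : m ≠ 0 := by intro h'; subst h'; simp at h0
        have hT := pvLeven m hm
        have hbl := pvBlDouble m hm
        have hfuel : PySem.Int.bitLength m + 2 * pvT m < f := by omega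
        simp only [minOpGo, if_neg h0, if_pos he, pvShift1]
        rw [ih m ops hfuel, hT]
      · by_cases h3 : PySem.Int.band n 3 = 3
        · have hmod : n % 4 = 3 := by rw [pvBand3] at h3; exact h3
          have hT := pvL3 n hmod
          have hbl := pvBlAdj n 1 (by decide)
          have hfuel : PySem.Int.bitLength (n+1) + 2 * pvT (n+1) < f := by omega
          simp only [minOpGo, if_neg h0, if_neg he, if_pos h3]
          rw [ih (n+1) (ops+1) hfuel, hT]
          push_cast; ring
        · have hodd : n % 2 = 1 := by rw [pvBand1] at he; omega
          have hmod : n % 4 = 1 := by rw [pvBand3] at h3; omega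
          have hT := pvL1 n hmod
          have hbl : PySem.Int.bitLength (n-1) ≤ PySem.Int.bitLength n + 1 := by
            have hb := pvBlAdj n (-1) (by decide)
            simpa [sub_eq_add_neg] using hb
          have hfuel : PySem.Int.bitLength (n-1) + 2 * pvT (n-1) < f := by omega
          simp only [minOpGo, if_neg h0, if_neg he, if_neg h3]
          rw [ih (n-1) (ops+1) hfuel, hT]
          push_cast; ring

-- ===== VERDICT (by name: the statement is the Claim_ definition above) =====
theorem minOperations_spec : Claim_equal_minOperations := by
  intro n _
  unfold Spec_minOperations minOperations minOperations_alt
  have hT := pvTle n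
  have h : PySem.Int.bitLength n + 2 * pvT n < 3 * PySem.Int.bitLength n + 5 := by omega
  rw [pvGoEq _ n 0 h]
  unfold pvT
  ring
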